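-- pv_equiv track=rewrite | github.com/nickaigi/automatic-dollop | arcade_solutions/the_core/pair_of_shoes.py | pair_of_shoes
-- ===== SOURCE A (Python) =====
-- def pair_of_shoes(shoes):
--     shoes_dict = {}
--     for s in shoes:
--         if s[0] in shoes_dict.keys():
--             shoes_dict[s[0]].append(s[1])
--         else:
--             shoes_dict[s[0]] = [s[1]]
--     for p in shoes_dict:
--         if len(shoes_dict[p]) != 2:
--             return False
--     return True
-- ===== SOURCE B (Python) =====
-- def pair_of_shoes(shoes):
--     ordered = sorted(((s[0], s[1]) for s in shoes), key=lambda p: p[0])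
--     current = None
--     count = 0
--     for k, _ in ordered:
--         if current is not None and k == current:
--             count += 1
--         else:
--             if current is not None and count != 2:
--                 return False
--             current = k
--             count = 1
--     if current is not None and count != 2:
--         return False
--     return True
-- ===== Notes on version B (the rewrite author's own statement) =====
-- stated objective: alternative
-- what changed: Replaced the hash-map grouping of second fields by first field with a sort of the first fields followed by a single run-length scan checking every run has length exactly 2.
import Mathlib
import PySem

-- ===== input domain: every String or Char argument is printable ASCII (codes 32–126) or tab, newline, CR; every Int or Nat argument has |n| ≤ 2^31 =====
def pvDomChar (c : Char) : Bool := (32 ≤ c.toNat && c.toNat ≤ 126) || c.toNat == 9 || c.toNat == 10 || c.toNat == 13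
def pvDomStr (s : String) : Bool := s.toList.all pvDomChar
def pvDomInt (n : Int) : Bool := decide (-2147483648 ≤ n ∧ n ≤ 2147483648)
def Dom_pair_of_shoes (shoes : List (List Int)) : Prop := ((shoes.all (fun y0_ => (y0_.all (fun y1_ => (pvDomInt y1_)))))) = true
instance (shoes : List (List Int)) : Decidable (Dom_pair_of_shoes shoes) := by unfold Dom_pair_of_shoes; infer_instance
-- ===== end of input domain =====

-- B replaces A's hash-map grouping by a sort of the (key, value) pairs by key plus a run-length scan over the keys (alternative decomposition, not claimed faster).

-- ===== PORT A =====
def pair_of_shoes (shoes : List (List Int)) : Bool :=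
  let d := shoes.foldl (fun d s =>
      let k := (PySem.List.pyGet? s 0).getD 0
      let v := (PySem.List.pyGet? s 1).getD 0
      if d.contains k then d.insert k (((d.get? k).getD []) ++ [v])
      else d.insert k [v]) PySem.Dict.empty
  d.keys.all (fun p => ((d.get? p).getD []).length == 2)

-- ===== PORT B =====
-- run-length scan over the keys of the sorted pairs: cur = current run's key, cnt = its length so far
def pvScan : Option Int → Int → List Int → Bool
  | cur, cnt, [] => if cur.isSome ∧ cnt ≠ 2 then false else true
  | cur, cnt, k :: ks =>
    if cur.isSome ∧ some k = cur then pvScan cur (cnt + 1) ks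
    else if cur.isSome ∧ cnt ≠ 2 then false
    else pvScan (some k) 1 ks

def pair_of_shoes_alt (shoes : List (List Int)) : Bool :=
  let ordered := PySem.List.sorted
      (shoes.map (fun s => ((PySem.List.pyGet? s 0).getD 0, (PySem.List.pyGet? s 1).getD 0)))
      (fun p => p.1) false
  pvScan none 0 (ordered.map Prod.fst)

-- ===== PRECONDITION & SPEC =====
-- Pre_ excludes exactly the inputs on which both Pythons raise IndexError: a shoe with fewer than 2 fields.
def Pre_pair_of_shoes (shoes : List (List Int)) : Prop := ∀ s ∈ shoes, 2 ≤ s.length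
instance (shoes : List (List Int)) : Decidable (Pre_pair_of_shoes shoes) := by unfold Pre_pair_of_shoes; infer_instance
def pvWitness_pair_of_shoes : List (List Int) := [[1, 2], [3, 4], [1, 5], [3, 6]]

def Spec_pair_of_shoes (shoes : List (List Int)) (out : Bool) : Prop := out = pair_of_shoes_alt shoes
instance (shoes : List (List Int)) (out : Bool) : Decidable (Spec_pair_of_shoes shoes out) := by unfold Spec_pair_of_shoes; infer_instance

-- ===== CLAIM (what is proved, stated in full; the proofs are below) =====
def Claim_equal_pair_of_shoes : Prop := ∀ (shoes : List (List Int)), Dom_pair_of_shoes shoes → Pre_pair_of_shoes shoes → Spec_pair_of_shoes shoes (pair_of_shoes shoes)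

-- ===== LEMMAS AND PROOFS =====

def pvKey (s : List Int) : Int := (PySem.List.pyGet? s 0).getD 0
def pvVal (s : List Int) : Int := (PySem.List.pyGet? s 1).getD 0
def pvAllc (ks : List Int) : Prop := ∀ c ∈ ks, ks.count c = 2

theorem pvStep_eq (d : PySem.Dict Int (List Int)) (s : List Int) :
    (if d.contains (pvKey s) then d.insert (pvKey s) (((d.get? (pvKey s)).getD []) ++ [pvVal s])
     else d.insert (pvKey s) [pvVal s])
    = d.insert (pvKey s) ((d.getD (pvKey s) []) ++ [pvVal s]) := by
  by_cases h : d.contains (pvKey s) = true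
  · simp [h, PySem.Dict.getD_eq_get?_getD]
  · simp only [Bool.not_eq_true] at h
    simp [h, PySem.Dict.getD_of_not_contains]

theorem pvFold_getD (l : List (List Int)) (d : PySem.Dict Int (List Int)) (c : Int) :
    (l.foldl (fun d s => d.insert (pvKey s) ((d.getD (pvKey s) []) ++ [pvVal s])) d).getD c []
    = d.getD c [] ++ (l.filter (fun s => pvKey s == c)).map pvVal := by
  induction l generalizing d with
  | nil => simp
  | cons s l ih =>
    simp only [List.foldl_cons, List.filter_cons]
    rw [ih]
    by_cases h : pvKey s = c
    · simp [h]
    · have : (pvKey s == c) = false := by simp [h]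
      simp [this, PySem.Dict.getD_insert, Ne.symm h]

theorem pair_of_shoes_iff (shoes : List (List Int)) :
    pair_of_shoes shoes = true ↔ pvAllc (shoes.map pvKey) := by
  unfold pair_of_shoes
  have hfun : (fun (d : PySem.Dict Int (List Int)) (s : List Int) =>
      let k := (PySem.List.pyGet? s 0).getD 0
      let v := (PySem.List.pyGet? s 1).getD 0
      if d.contains k then d.insert k (((d.get? k).getD []) ++ [v])
      else d.insert k [v])
      = (fun d s => d.insert (pvKey s) ((d.getD (pvKey s) []) ++ [pvVal s])) := by
    funext d s
    exact pvStep_eq d s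
  rw [hfun]
  set d := shoes.foldl (fun d s => d.insert (pvKey s) ((d.getD (pvKey s) []) ++ [pvVal s])) PySem.Dict.empty with hd
  have hkeys : d.keys = PySem.Set.ofList (shoes.map pvKey) := by
    rw [hd, PySem.Dict.keys_foldl_insert_key]
    simp [PySem.Set.update_nil_left]
  have hget : ∀ c : Int, (d.get? c).getD [] = (shoes.filter (fun s => pvKey s == c)).map pvVal := by
    intro c
    rw [← PySem.Dict.getD_eq_get?_getD, hd, pvFold_getD]
    simp
  have hcount : ∀ c : Int, ((shoes.filter (fun s => pvKey s == c)).map pvVal).length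
      = (shoes.map pvKey).count c := by
    intro c
    rw [List.length_map, ← List.countP_eq_length_filter, List.count_eq_countP, List.countP_map]
    rfl
  constructor
  · intro h c hc
    rw [List.all_eq_true] at h
    have hc' : c ∈ d.keys := by
      rw [hkeys, PySem.Set.mem_ofList]; exact hc
    have := h c hc'
    rw [hget, hcount] at this
    simpa using this
  · intro h
    rw [List.all_eq_true]
    intro c hc
    rw [hkeys, PySem.Set.mem_ofList] at hc
    rw [hget, hcount]
    simpa using h c hc

theorem pvAllc_cons (y : Int) (ys : List Int) :
    pvAllc (y :: ys) ↔ ((y :: ys).count y = 2 ∧ pvAllc (ys.filter (fun c => !(c == y)))) := by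
  constructor
  · intro h
    refine ⟨h y (by simp), ?_⟩
    intro c hc
    have hmem := List.mem_filter.mp hc
    have hcy : c ≠ y := by simpa using hmem.2
    have h2 := h c (by simp [hmem.1])
    have hcf : (ys.filter (fun c' => !(c' == y))).count c = ys.count c := by
      rw [List.count_eq_countP, List.count_eq_countP, List.countP_filter]
      apply List.countP_congr
      intro a _
      constructor
      · intro ha; exact (Bool.and_elim_left ha)
      · intro ha
        have : a = c := by simpa using ha
        simp [this, hcy]
    rw [hcf]
    rw [List.count_cons, if_neg (by simpa using Ne.symm hcy)] at h2
    simpa using h2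
  · rintro ⟨hy, hrest⟩
    intro c hc
    by_cases hcy : c = y
    · rw [hcy]; exact hy
    · have hc' : c ∈ ys := by
        rcases List.mem_cons.mp hc with h | h
        · exact absurd h hcy
        · exact h
      have hcf : c ∈ ys.filter (fun c' => !(c' == y)) := by
        rw [List.mem_filter]; simp [hc', hcy]
      have h2 := hrest c hcf
      have heq : (ys.filter (fun c' => !(c' == y))).count c = ys.count c := by
        rw [List.count_eq_countP, List.count_eq_countP, List.countP_filter]
        apply List.countP_congr
        intro a _
        constructor
        · intro ha; exact (Bool.and_elim_left ha)
        · intro ha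
          have : a = c := by simpa using ha
          simp [this, hcy]
      rw [List.count_cons, if_neg (by simpa using Ne.symm hcy)]
      rw [heq] at h2
      simpa using h2

theorem pvScan_inv (ys : List Int) (hs : ys.Pairwise (· ≤ ·)) :
    ∀ (k : Int) (n : Int), (∀ y ∈ ys, k ≤ y) →
    (pvScan (some k) n ys = true ↔
      (n + (ys.count k : Int) = 2 ∧ pvAllc (ys.filter (fun c => !(c == k))))) := by
  induction ys with
  | nil =>
    intro k n _
    simp only [pvScan, List.count_nil]
    constructor
    · intro h
      constructor
      · by_contra hn
        have : n ≠ 2 := by omega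
        simp [this] at h
      · intro c hc; simp at hc
    · rintro ⟨h1, _⟩
      have : n = 2 := by omega
      simp [this]
  | cons y ys ih =>
    intro k n hk
    have hsy : ys.Pairwise (· ≤ ·) := hs.tail
    have hyle : ∀ z ∈ ys, y ≤ z := fun z hz => (List.pairwise_cons.mp hs).1 z hz
    by_cases hyk : y = k
    · subst hyk
      simp only [pvScan]
      rw [if_pos (by simp)]
      rw [ih hsy y (n + 1) hyle]
      constructor
      · rintro ⟨h1, h2⟩
        refine ⟨?_, ?_⟩
        · rw [List.count_cons]; simp; omega
        · simpa [List.filter_cons] using h2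
      · rintro ⟨h1, h2⟩
        rw [List.count_cons] at h1; simp at h1
        refine ⟨by omega, ?_⟩
        simpa [List.filter_cons] using h2
    · have hky : k < y := lt_of_le_of_ne (hk y (by simp)) (fun h => hyk h.symm)
      have hknot : ∀ z ∈ ys, k < z := fun z hz => lt_of_lt_of_le hky (hyle z hz)
      have hcnt : (y :: ys).count k = 0 := by
        rw [List.count_eq_zero]
        intro hmem
        rcases List.mem_cons.mp hmem with h | h
        · exact hyk h.symm
        · exact absurd rfl (ne_of_gt (hknot k h))
      have hfilt : (y :: ys).filter (fun c => !(c == k)) = y :: ys := by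
        rw [List.filter_eq_self]
        intro a ha
        rcases List.mem_cons.mp ha with h | h
        · simp [h, hyk]
        · simp [ne_of_gt (hknot a h)]
      simp only [pvScan]
      rw [if_neg (by simpa using hyk)]
      by_cases hn : n = 2
      · rw [if_neg (by simp [hn])]
        rw [ih hsy y 1 hyle]
        rw [hcnt, hfilt]
        constructor
        · rintro ⟨h1, h2⟩
          refine ⟨by omega, ?_⟩
          rw [pvAllc_cons]
          refine ⟨?_, h2⟩
          rw [List.count_cons]
          simp at h1 ⊢
          omega
        · rintro ⟨_, h2⟩
          rw [pvAllc_cons] at h2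
          obtain ⟨h2a, h2b⟩ := h2
          refine ⟨?_, h2b⟩
          rw [List.count_cons] at h2a
          simp at h2a
          omega
      · rw [if_pos (by simp [hn])]
        rw [hcnt]
        constructor
        · intro h; exact absurd h (by simp)
        · rintro ⟨h1, _⟩; omega

theorem pvScan_sorted (ys : List Int) (hs : ys.Pairwise (· ≤ ·)) :
    pvScan none 0 ys = true ↔ pvAllc ys := by
  cases ys with
  | nil =>
    simp only [pvScan]
    constructor
    · intro _ c hc; simp at hc
    · intro _; simp
  | cons y ys =>
    have hsy : ys.Pairwise (· ≤ ·) := hs.tail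
    have hyle : ∀ z ∈ ys, y ≤ z := fun z hz => (List.pairwise_cons.mp hs).1 z hz
    simp only [pvScan]
    rw [if_neg (by simp), if_neg (by simp)]
    rw [pvScan_inv ys hsy y 1 hyle, pvAllc_cons]
    constructor
    · rintro ⟨h1, h2⟩
      refine ⟨?_, h2⟩
      rw [List.count_cons]; simp; omega
    · rintro ⟨h1, h2⟩
      refine ⟨?_, h2⟩
      rw [List.count_cons] at h1; simp at h1; omega

theorem pair_of_shoes_alt_iff (shoes : List (List Int)) :
    pair_of_shoes_alt shoes = true ↔ pvAllc (shoes.map pvKey) := by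
  unfold pair_of_shoes_alt
  set pairs := shoes.map (fun s => ((PySem.List.pyGet? s 0).getD 0, (PySem.List.pyGet? s 1).getD 0)) with hpairs
  set ord := PySem.List.sorted pairs (fun p => p.1) false with hord
  have hperm : (ord.map Prod.fst).Perm (shoes.map pvKey) := by
    have h1 : ord.Perm pairs := PySem.List.sorted_perm pairs (fun p => p.1) false
    have h2 : (pairs.map Prod.fst) = shoes.map pvKey := by
      rw [hpairs, List.map_map]; rfl
    exact h2 ▸ h1.map Prod.fst
  have hpw : (ord.map Prod.fst).Pairwise (· ≤ ·) := by
    have := PySem.List.sorted_pairwise pairs (fun p => p.1)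
    rw [← hord] at this
    exact List.pairwise_map.mpr this
  rw [pvScan_sorted (ord.map Prod.fst) hpw]
  unfold pvAllc
  constructor
  · intro h c hc
    have := h c (hperm.mem_iff.mpr hc)
    rwa [hperm.count_eq] at this
  · intro h c hc
    rw [hperm.count_eq]
    exact h c (hperm.mem_iff.mp hc)

-- ===== VERDICT (by name: the statement is the Claim_ definition above) =====
theorem pair_of_shoes_spec : Claim_equal_pair_of_shoes := by
  intro shoes _ _
  unfold Spec_pair_of_shoes
  have hA := pair_of_shoes_iff shoes
  have hB := pair_of_shoes_alt_iff shoes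
  cases hb : pair_of_shoes_alt shoes
  · cases ha : pair_of_shoes shoes
    · rfl
    · exact absurd (hB.mpr (hA.mp ha)) (by simp [hb])
  · exact hA.mpr (hB.mp hb)
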